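-- pv_equiv track=rewrite | github.com/StephensMane/TP5_Fournie_Manebard | TP5_qualite_Fournie_Manebard.py | Feature12
-- ===== SOURCE A (Python) =====
-- def sous_1_Feature11(nom):
--
--   liste_noms = list()
--   liste_ignores = list()
--   liste_evolue = list()
--
--   i = 0
--
--   while i < len(nom):
--
--     liste_noms += ['']
--     while i < len(nom) and nom[i] !=',':
--
--       if nom[i]==' ':
--         i +=1
--       else:
--         liste_noms[len(liste_noms)-1] += nom[i]
--         i += 1
--
--     i += 1
--
--
--   for n in liste_noms:
--
--     if n[0] == '!':
--       liste_ignores.append(n[1:])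
--
--   y=0
--
--   while y < len(liste_noms):
--     if liste_noms[y] in liste_ignores or liste_noms[y][0] == '!':
--       liste_noms.remove(liste_noms[y])
--     else:
--       y+= 1
--
--   for e in liste_noms:
--     if not e in liste_evolue:
--       liste_evolue.append(e)
--       liste_evolue.append(liste_noms.count(e))
--
--   i=0
--
--   while i < len(liste_evolue):
--
--     if not liste_evolue[i][0].isupper():
--       noms = liste_evolue[i][0:1].capitalize() + liste_evolue[i][1:]
--       liste_evolue[i]=noms
--
--     i+=2
--
--   return liste_evolue
--
-- def Feature12(nom):
--
--   liste_evolue = sous_1_Feature11(nom)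
--
--   maj=0
--   i=0
--
--   while i < len(liste_evolue):
--     if liste_evolue[i].isupper():
--       maj+= 1
--     i+= 2
--
--   if maj > 5 and len(liste_evolue) > 10 :
--     return("HELLO, WORLD !")
--
--   return("Hello, world !")
-- ===== SOURCE B (Python) =====
-- def Feature12(nom):
--     # one pass to parse: split on commas, dropping spaces; a trailing segment only if non-empty
--     names = []
--     cur = ''
--     for c in nom:
--         if c == ',':
--             names.append(cur)
--             cur = ''
--         elif c != ' ':
--             cur += c
--     if cur:
--         names.append(cur)
--     # ignore set, then a single filtered-dedupe pass keeping an uppercase counter only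
--     ignored = {n[1:] for n in names if n[0] == '!'}
--     seen = set()
--     maj = 0
--     for n in names:
--         if n[0] == '!' or n in ignored or n in seen:
--             continue
--         seen.add(n)
--         nn = n if n[0].isupper() else n[0].upper() + n[1:]
--         if nn.isupper():
--             maj += 1
--     return "HELLO, WORLD !" if maj > 5 and len(seen) > 5 else "Hello, world !"
-- ===== Notes on version B (the rewrite author's own statement) =====
-- stated objective: faster
-- what changed: A's index-based comma parse, quadratic remove()-loop over an ignore list, interleaved name/count list and two stride-2 index scans are replaced by one accumulator pass over the characters and a single fold over the names with an ignore set, a seen set and an uppercase counter; the unused occurrence counts are never computed.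
import Mathlib
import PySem

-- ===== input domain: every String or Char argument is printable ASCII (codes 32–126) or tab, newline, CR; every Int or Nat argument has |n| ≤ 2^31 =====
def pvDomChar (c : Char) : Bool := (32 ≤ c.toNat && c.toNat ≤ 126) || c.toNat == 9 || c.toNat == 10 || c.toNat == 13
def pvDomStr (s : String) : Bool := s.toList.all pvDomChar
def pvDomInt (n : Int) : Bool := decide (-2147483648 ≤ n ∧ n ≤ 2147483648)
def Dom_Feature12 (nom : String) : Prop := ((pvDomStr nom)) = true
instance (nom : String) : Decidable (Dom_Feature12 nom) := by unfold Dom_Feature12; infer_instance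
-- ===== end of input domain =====

-- B replaces A's multi-pass pipeline (index-based parse, quadratic remove-loop, interleaved name/count
-- list, two stride-2 scans) by one parsing pass and one filtered-dedupe fold keeping a seen-set and an
-- uppercase counter; the unused occurrence counts are dropped entirely.

-- Python str.isupper(), ported by hand (exact on the ASCII domain, where the cased characters are
-- exactly a-z/A-Z): at least one cased character and no lowercase one.  Called by both Pythons.
def pvIsUpperStr (s : List Char) : Bool := s.any PySem.Chars.isalpha && !(s.any PySem.Chars.islower)

-- ===== PORT A =====
-- inner while of sous_1_Feature11: consume chars up to and including the next ',', skipping ' '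
def pvSeg : List Char → List Char → List Char × List Char
  | [], acc => (acc, [])
  | c :: rest, acc =>
    if c = ',' then (acc, rest)
    else if c = ' ' then pvSeg rest acc
    else pvSeg rest (acc ++ [c])

-- termination fact for pvParse (cited by its decreasing_by)
theorem pvSeg_snd_lt (l : List Char) (acc : List Char) (h : l ≠ []) :
    (pvSeg l acc).2.length < l.length := by
  induction l generalizing acc with
  | nil => exact absurd rfl h
  | cons c rest ih =>
    simp only [pvSeg]
    split
    · simp
    · split <;>
      · rcases rest with _ | ⟨d, rest'⟩
        · simp [pvSeg]
        · exact Nat.lt_trans (ih _ (by simp)) (by simp)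

-- outer while of sous_1_Feature11
def pvParse : List Char → List (List Char)
  | [] => []
  | c :: rest =>
    let pr := pvSeg (c :: rest) []
    pr.1 :: pvParse pr.2
termination_by l => l.length
decreasing_by exact pvSeg_snd_lt _ _ (by simp)

-- "for n in liste_noms: if n[0]=='!': liste_ignores.append(n[1:])"  (n[0] is pyGet?, n[1:] a slice)
def pvIgnores (names : List (List Char)) : List (List Char) :=
  names.foldl
    (fun ig n => if PySem.List.pyGet? n 0 = some '!' then ig ++ [PySem.List.slice n (some 1) none] else ig)
    []

-- termination fact for pvRemoveLoop (cited by its decreasing_by)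
theorem pvRemove_len {names : List (List Char)} {y : Nat} (h : y < names.length) :
    ((PySem.List.remove? names names[y]).getD names).length < names.length := by
  rw [PySem.List.remove?_eq_some_erase names _ (List.getElem_mem h)]
  have := List.length_erase_of_mem (List.getElem_mem h)
  simp only [Option.getD_some]
  omega

-- "while y < len(liste_noms): if …: liste_noms.remove(liste_noms[y]) else: y += 1"
def pvRemoveLoop (names ign : List (List Char)) (y : Nat) : List (List Char) :=
  if h : y < names.length then
    if names[y] ∈ ign ∨ PySem.List.pyGet? names[y] 0 = some '!' then
      pvRemoveLoop ((PySem.List.remove? names names[y]).getD names) ign y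
    else pvRemoveLoop names ign (y + 1)
  else names
termination_by names.length - y
decreasing_by
  · have := pvRemove_len h; omega
  · omega

-- "for e in liste_noms: if not e in liste_evolue: append e; append liste_noms.count(e)"
-- (the Python list mixes str and int: modelled as a sum type; "e in liste_evolue" is the any-test)
def pvEvolue (ns : List (List Char)) : List (List Char ⊕ Int) :=
  ns.foldl
    (fun ev e =>
      if ev.any (fun x => decide (x = Sum.inl e)) then ev
      else ev ++ [Sum.inl e, Sum.inr (PySem.List.count ns e : Int)])
    []

-- "while i < len: if not liste_evolue[i][0].isupper(): liste_evolue[i] = capitalized; i += 2"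
-- liste_evolue[i][0] on an empty name raises IndexError in Python (excluded by Pre_): left unchanged here;
-- even indices always hold strings, so the Sum.inr branch is never reached.  s[0:1].capitalize() = upperChar on ASCII.
def pvCapLoop (ev : List (List Char ⊕ Int)) (i : Nat) : List (List Char ⊕ Int) :=
  if h : i < ev.length then
    let x' : List Char ⊕ Int :=
      match ev[i] with
      | Sum.inl s =>
        match s.head? with
        | some c => if PySem.Chars.isupper c then Sum.inl s else Sum.inl (PySem.Chars.upperChar c :: s.tail)
        | none => Sum.inl s
      | Sum.inr m => Sum.inr m
    pvCapLoop (ev.set i x') (i + 2)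
  else ev
termination_by ev.length - i
decreasing_by simp; omega

-- "while i < len: if liste_evolue[i].isupper(): maj += 1; i += 2"  (ints never reached at even indices)
def pvMajLoop (ev : List (List Char ⊕ Int)) (i : Nat) (maj : Int) : Int :=
  if h : i < ev.length then
    pvMajLoop ev (i + 2)
      (if (match ev[i] with | Sum.inl s => pvIsUpperStr s | Sum.inr _ => false) then maj + 1 else maj)
  else maj
termination_by ev.length - i
decreasing_by omega

def Feature12 (nom : String) : String :=
  let ns0 := pvParse nom.toList
  let ign := pvIgnores ns0
  let ns := pvRemoveLoop ns0 ign 0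
  let ev := pvCapLoop (pvEvolue ns) 0
  let maj := pvMajLoop ev 0 0
  if maj > 5 ∧ PySem.List.len ev > 10 then "HELLO, WORLD !" else "Hello, world !"

-- ===== PORT B =====
-- "for c in nom: if c==',': names.append(cur); cur='' elif c != ' ': cur += c"
def pvAltStep (st : List (List Char) × List Char) (c : Char) : List (List Char) × List Char :=
  if c = ',' then (st.1 ++ [st.2], []) else if c ≠ ' ' then (st.1, st.2 ++ [c]) else st

-- "nn = n if n[0].isupper() else n[0].upper() + n[1:]"  (n is nonempty under Pre_, guarded by head?)
def pvAltCap (n : List Char) : List Char :=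
  match n.head? with
  | some c => if PySem.Chars.isupper c then n else PySem.Chars.upperChar c :: n.tail
  | none => n

def Feature12_alt (nom : String) : String :=
  let p := nom.toList.foldl pvAltStep ([], [])
  let names := if p.2 ≠ [] then p.1 ++ [p.2] else p.1
  let ignored := PySem.Set.ofList ((names.filter (fun n => n.head? == some '!')).map (fun n => n.drop 1))
  let r := names.foldl
    (fun (st : PySem.Set (List Char) × Int) n =>
      if n.head? == some '!' || PySem.Set.contains ignored n || PySem.Set.contains st.1 n then st
      else (PySem.Set.add st.1 n, if pvIsUpperStr (pvAltCap n) then st.2 + 1 else st.2))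
    (PySem.Set.empty, 0)
  if r.2 > 5 ∧ PySem.Set.len r.1 > 5 then "HELLO, WORLD !" else "Hello, world !"

-- ===== PRECONDITION & SPEC =====
-- Pre_ excludes exactly the inputs on which A raises IndexError: those where some comma-separated piece
-- (other than an empty trailing piece) contains no non-space character, so a parsed name is empty and n[0] raises.
def Pre_Feature12 (nom : String) : Prop :=
  (∀ p ∈ (nom.toList.splitOn ',').dropLast, p.any (fun c => !(c == ' ')) = true) ∧
  ((nom.toList.splitOn ',').getLast?.getD [] = [] ∨
    ((nom.toList.splitOn ',').getLast?.getD []).any (fun c => !(c == ' ')) = true)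
instance (nom : String) : Decidable (Pre_Feature12 nom) := by unfold Pre_Feature12; infer_instance

def pvWitness_Feature12 : String := "Alice, Bob"

def Spec_Feature12 (nom : String) (out : String) : Prop := out = Feature12_alt nom
instance (nom : String) (out : String) : Decidable (Spec_Feature12 nom out) := by unfold Spec_Feature12; infer_instance

-- ===== CLAIM (what is proved, stated in full; the proofs are below) =====
def Claim_equal_Feature12 : Prop :=
  ∀ (nom : String), Dom_Feature12 nom → Pre_Feature12 nom → Spec_Feature12 nom (Feature12 nom)
-- ===== LEMMAS AND PROOFS =====
def pvStrip (p : List Char) : List Char := p.filter (fun c => !(c == ' '))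

theorem pvSeg_eq (l : List Char) (acc : List Char) :
    pvSeg l acc = (acc ++ pvStrip (l.takeWhile (fun c => !(c == ','))),
                   (l.dropWhile (fun c => !(c == ','))).tail) := by
  induction l generalizing acc with
  | nil => simp [pvSeg, pvStrip]
  | cons c rest ih =>
    by_cases hc : c = ','
    · simp [pvSeg, hc, pvStrip, List.takeWhile_cons, List.dropWhile_cons]
    · by_cases hs : c = ' '
      · simp [pvSeg, hc, hs, ih, pvStrip, List.takeWhile_cons, List.dropWhile_cons]
      · simp [pvSeg, hc, hs, ih, pvStrip, List.takeWhile_cons, List.dropWhile_cons]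

def pvPop (q : List (List Char)) : List (List Char) := if q.getLast? = some [] then q.dropLast else q

-- decomposition of l at the first comma

theorem pvDecomp (l : List Char) (h : ',' ∈ l) :
    ∃ tw as, l = tw ++ ',' :: as ∧ ',' ∉ tw ∧
      tw = l.takeWhile (fun c => !(c == ',')) ∧ ','::as = l.dropWhile (fun c => !(c == ',')) := by
  have hdw : l.dropWhile (fun c => !(c == ',')) ≠ [] := by
    intro he
    have := List.dropWhile_eq_nil_iff.mp he
    simp at this
    exact (this _ h) rfl
  have hhd := List.head_dropWhile_not (p := fun c => !(c == ',')) (l := l) hdw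
  simp at hhd
  have hdweq : l.dropWhile (fun c => !(c == ',')) = ',' :: (l.dropWhile (fun c => !(c == ','))).tail := by
    conv_lhs => rw [← List.cons_head_tail hdw]
    rw [hhd]
  refine ⟨l.takeWhile (fun c => !(c == ',')), (l.dropWhile (fun c => !(c == ','))).tail, ?_, ?_, rfl, hdweq.symm⟩
  · conv_lhs => rw [← List.takeWhile_append_dropWhile (p := fun c => !(c == ',')) (l := l)]
    rw [← hdweq]
  · intro hmem
    have := List.mem_takeWhile_imp hmem
    simp at this

theorem pvGetLast?_cons (x : List Char) (ps : List (List Char)) (h : ps ≠ []) :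
    (x :: ps).getLast? = ps.getLast? := by
  rcases ps with _|⟨a,t⟩
  · simp at h
  · simp [List.getLast?_cons_cons]

theorem pvPop_cons (x : List Char) (ps : List (List Char)) (h : ps ≠ []) :
    pvPop (x :: ps) = x :: pvPop ps := by
  unfold pvPop
  rw [pvGetLast?_cons x ps h, List.dropLast_cons_of_ne_nil h]
  split <;> rfl

theorem pvTakeDrop (tw as : List Char) (htw : ',' ∉ tw) :
    (tw ++ ',' :: as).takeWhile (fun c => !(c == ',')) = tw ∧
    (tw ++ ',' :: as).dropWhile (fun c => !(c == ',')) = ',' :: as := by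
  have hall : ∀ x ∈ tw, (fun c => !(c == ',')) x = true := by
    intro x hx; simp; intro he; exact htw (he ▸ hx)
  constructor
  · rw [List.takeWhile_append, if_pos (by rw [List.takeWhile_eq_self_iff.mpr hall])]
    simp [List.takeWhile_cons]
  · rw [List.dropWhile_append, if_pos (by rw [List.dropWhile_eq_nil_iff.mpr hall]; rfl)]
    simp [List.dropWhile_cons]

theorem pvParse_eq_spec (l : List Char) : pvParse l = (pvPop (l.splitOn ',')).map pvStrip := by
  suffices h : ∀ n (l : List Char), l.length ≤ n → pvParse l = (pvPop (l.splitOn ',')).map pvStrip from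
    h l.length l le_rfl
  intro n
  induction n with
  | zero =>
    intro l hl
    have : l = [] := by cases l <;> simp_all
    subst this
    simp [pvParse, List.splitOn, List.splitOnP_nil, pvPop]
  | succ n ih =>
    intro l hl
    by_cases h0 : l = []
    · subst h0; simp [pvParse, List.splitOn, List.splitOnP_nil, pvPop]
    by_cases hc : ',' ∈ l
    · obtain ⟨tw, as, rfl, htw, -, -⟩ := pvDecomp l hc
      have hsp : (tw ++ ',' :: as).splitOn ',' = tw :: as.splitOn ',' := by
        unfold List.splitOn
        exact List.splitOnP_first _ tw (by intro x hx hpx; simp at hpx; exact htw (hpx ▸ hx)) ',' (by simp) as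
      have hne : as.splitOn ',' ≠ [] := List.splitOnP_ne_nil _ _
      obtain ⟨htk, hdr⟩ := pvTakeDrop tw as htw
      have hparse : pvParse (tw ++ ',' :: as) = pvStrip tw :: pvParse as := by
        rcases he : tw ++ ',' :: as with _|⟨c,rest⟩
        · simp at he
        · rw [← he]
          conv_lhs => rw [he, pvParse, ← he]
          rw [pvSeg_eq, htk, hdr]
          simp
      rw [hparse, hsp, pvPop_cons _ _ hne, List.map_cons]
      congr 1
      exact ih as (by simp at hl; omega)
    · have hsp : l.splitOn ',' = [l] := by
        unfold List.splitOn
        exact List.splitOnP_eq_single _ _ (by intro x hx hpx; simp at hpx; exact hc (hpx ▸ hx))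
      rw [hsp]
      have hpp : pvPop [l] = [l] := by
        unfold pvPop
        simp [h0]
      rw [hpp]
      rcases l with _ | ⟨c, rest⟩
      · simp at h0
      · simp only [pvParse, pvSeg_eq]
        rw [List.takeWhile_eq_self_iff.mpr, List.dropWhile_eq_nil_iff.mpr]
        · simp [pvParse]
        · intro x hx; simp; intro hx2; exact hc (hx2 ▸ hx)
        · intro x hx; simp; intro hx2; exact hc (hx2 ▸ hx)

theorem pvFoldTw (tw : List Char) (htw : ',' ∉ tw) (ns : List (List Char)) (cur : List Char) :
    tw.foldl pvAltStep (ns, cur) = (ns, cur ++ pvStrip tw) := by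
  induction tw generalizing cur with
  | nil => simp [pvStrip]
  | cons c rest ih =>
    have hc : ¬ c = ',' := fun he => htw (he ▸ List.mem_cons_self ..)
    by_cases hs : c = ' '
    · simp only [List.foldl_cons, pvAltStep, if_neg hc, hs]
      simpa [pvStrip] using ih (fun hm => htw (List.mem_cons_of_mem _ hm)) cur
    · simp only [List.foldl_cons, pvAltStep, if_neg hc, if_pos (by simpa using hs)]
      rw [ih (fun hm => htw (List.mem_cons_of_mem _ hm))]
      simp [pvStrip, hs]

theorem pvAltNames_eq' (l : List Char) (ns : List (List Char)) (cur : List Char) :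
    (fun p : List (List Char) × List Char => if p.2 ≠ [] then p.1 ++ [p.2] else p.1)
        (l.foldl pvAltStep (ns, cur)) =
      ns ++ pvPop (((l.splitOn ',').map pvStrip).modifyHead (cur ++ ·)) := by
  suffices h : ∀ n (l : List Char), l.length ≤ n → ∀ ns cur,
      (fun p : List (List Char) × List Char => if p.2 ≠ [] then p.1 ++ [p.2] else p.1)
          (l.foldl pvAltStep (ns, cur)) =
        ns ++ pvPop (((l.splitOn ',').map pvStrip).modifyHead (cur ++ ·)) from
    h l.length l le_rfl ns cur
  intro n
  induction n with
  | zero =>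
    intro l hl ns cur
    have : l = [] := by cases l <;> simp_all
    subst this
    simp only [List.foldl_nil, List.splitOn_nil, List.map_cons, List.map_nil, List.modifyHead_cons]
    unfold pvPop
    by_cases hcur : cur = [] <;> simp [hcur, pvStrip]
  | succ n ih =>
    intro l hl ns cur
    by_cases h0 : l = []
    · subst h0
      simp only [List.foldl_nil, List.splitOn_nil, List.map_cons, List.map_nil, List.modifyHead_cons]
      unfold pvPop
      by_cases hcur : cur = [] <;> simp [hcur, pvStrip]
    by_cases hc : ',' ∈ l
    · obtain ⟨tw, as, rfl, htw, -, -⟩ := pvDecomp l hc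
      have hsp : (tw ++ ',' :: as).splitOn ',' = tw :: as.splitOn ',' := by
        unfold List.splitOn
        exact List.splitOnP_first _ tw (by intro x hx hpx; simp at hpx; exact htw (hpx ▸ hx)) ',' (by simp) as
      have hne : as.splitOn ',' ≠ [] := List.splitOnP_ne_nil _ _
      have hfold : (tw ++ ',' :: as).foldl pvAltStep (ns, cur) =
          as.foldl pvAltStep (ns ++ [cur ++ pvStrip tw], []) := by
        rw [List.foldl_append, pvFoldTw tw htw]
        simp [pvAltStep]
      rw [hfold, ih as (by simp at hl; omega), hsp]
      have hmap : ((tw :: as.splitOn ',').map pvStrip).modifyHead (cur ++ ·) =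
          (cur ++ pvStrip tw) :: (as.splitOn ',').map pvStrip := by
        simp
      rw [hmap, pvPop_cons _ _ (by simpa using hne)]
      have hid : List.modifyHead (fun p : List Char => p) ((as.splitOn ',').map pvStrip) =
          (as.splitOn ',').map pvStrip := by
        cases hh : (as.splitOn ',').map pvStrip <;> simp
      simp only [List.nil_append, hid]
      simp
    · have hsp : l.splitOn ',' = [l] := by
        unfold List.splitOn
        exact List.splitOnP_eq_single _ _ (by intro x hx hpx; simp at hpx; exact hc (hpx ▸ hx))
      rw [hsp, pvFoldTw l hc]
      simp only [List.map_cons, List.map_nil, List.modifyHead_cons]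
      unfold pvPop
      by_cases he : cur ++ pvStrip l = [] <;> simp [he]

theorem pvStrip_ne_nil (p : List Char) (h : p.any (fun c => !(c == ' ')) = true) : pvStrip p ≠ [] := by
  obtain ⟨c, hc, hq⟩ := List.any_eq_true.mp h
  exact List.ne_nil_of_mem (List.mem_filter.mpr ⟨hc, hq⟩)

theorem pvNames_eq_of_pre' (l : List Char)
    (h1 : ∀ p ∈ (l.splitOn ',').dropLast, p.any (fun c => !(c == ' ')) = true)
    (h2 : (l.splitOn ',').getLast?.getD [] = [] ∨
      ((l.splitOn ',').getLast?.getD []).any (fun c => !(c == ' ')) = true) :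
    pvPop ((l.splitOn ',').map pvStrip) = (pvPop (l.splitOn ',')).map pvStrip ∧
      ∀ n ∈ (pvPop (l.splitOn ',')).map pvStrip, n ≠ [] := by
  set qs := l.splitOn ',' with hqs
  have hne : qs ≠ [] := List.splitOnP_ne_nil _ _
  have hlast : qs.getLast? = some (qs.getLast hne) := List.getLast?_eq_some_getLast hne
  by_cases hL : qs.getLast hne = []
  · have hpopA : pvPop qs = qs.dropLast := by unfold pvPop; rw [hlast, hL]; simp
    have hpopB : pvPop (qs.map pvStrip) = (qs.map pvStrip).dropLast := by
      unfold pvPop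
      rw [List.getLast?_map, hlast, hL]
      simp [pvStrip]
    refine ⟨by rw [hpopA, hpopB]; exact List.map_dropLast.symm, ?_⟩
    rw [hpopA]
    intro n hn
    obtain ⟨p, hp, rfl⟩ := List.mem_map.mp hn
    exact pvStrip_ne_nil p (h1 p hp)
  · have hgetD : qs.getLast?.getD [] = qs.getLast hne := by rw [hlast]; rfl
    have hany : (qs.getLast hne).any (fun c => !(c == ' ')) = true := by
      rcases h2 with h2 | h2
      · exact absurd (hgetD ▸ h2) hL
      · exact hgetD ▸ h2
    have hpopA : pvPop qs = qs := by
      unfold pvPop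
      rw [hlast]
      simp [hL]
    have hpopB : pvPop (qs.map pvStrip) = qs.map pvStrip := by
      unfold pvPop
      rw [List.getLast?_map, hlast]
      simp only [Option.map_some]
      rw [if_neg (by simpa using pvStrip_ne_nil _ hany)]
    refine ⟨by rw [hpopA, hpopB], ?_⟩
    rw [hpopA]
    intro n hn
    obtain ⟨p, hp, rfl⟩ := List.mem_map.mp hn
    have : p ∈ qs.dropLast ∨ p = qs.getLast hne := by
      have := List.dropLast_append_getLast hne
      rw [← this] at hp
      rcases List.mem_append.mp hp with h | h
      · exact Or.inl h
      · exact Or.inr (by simpa using h)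
    rcases this with h | rfl
    · exact pvStrip_ne_nil p (h1 p h)
    · exact pvStrip_ne_nil _ hany

def pvKeep (ign : List (List Char)) (n : List Char) : Bool :=
  !(decide (n ∈ ign ∨ PySem.List.pyGet? n 0 = some '!'))

theorem pvRemoveLoop_eq (ign : List (List Char)) :
    ∀ k (names : List (List Char)) (y : Nat), names.length - y ≤ k → (hy : y ≤ names.length) →
    (∀ j (hj : j < y), pvKeep ign (names[j]'(Nat.lt_of_lt_of_le hj hy)) = true) →
    pvRemoveLoop names ign y = names.take y ++ (names.drop y).filter (pvKeep ign) := by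
  intro k
  induction k with
  | zero =>
    intro names y hk hy hpre
    have hlen : y = names.length := by omega
    unfold pvRemoveLoop
    rw [dif_neg (by omega)]
    simp [hlen]
  | succ k ih =>
    intro names y hk hy hpre
    unfold pvRemoveLoop
    by_cases h : y < names.length
    · rw [dif_pos h]
      have hdropy : names.drop y = names[y] :: names.drop (y + 1) := List.drop_eq_getElem_cons h
      by_cases hcond : names[y] ∈ ign ∨ PySem.List.pyGet? names[y] 0 = some '!'
      · rw [if_pos hcond]
        have hnotin : names[y] ∉ names.take y := by
          intro hmem
          obtain ⟨j, hj, hje⟩ := List.mem_iff_getElem.mp hmem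
          have hjy : j < y := by
            have := hj
            simp [List.length_take] at this
            omega
          have := hpre j hjy
          rw [List.getElem_take] at hje
          rw [hje] at this
          simp [pvKeep, hcond] at this
        have herase : (PySem.List.remove? names names[y]).getD names =
            names.take y ++ names.drop (y + 1) := by
          rw [PySem.List.remove?_eq_some_erase names _ (List.getElem_mem h), Option.getD_some]
          obtain ⟨nv, hnv⟩ : ∃ nv, names[y] = nv := ⟨_, rfl⟩
          have hsplit : names = names.take y ++ nv :: names.drop (y + 1) := by
            conv_lhs => rw [← List.take_append_drop y names]
            rw [hdropy, hnv]
          rw [hnv] at hnotin ⊢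
          conv_lhs => rw [hsplit]
          rw [List.erase_append_right _ hnotin, List.erase_cons_head]
        rw [herase]
        have hlen' : (names.take y ++ names.drop (y + 1)).length = names.length - 1 := by
          simp [List.length_take]
          omega
        have htk : y ≤ (names.take y ++ names.drop (y + 1)).length := by omega
        rw [ih _ y (by omega) htk ?_]
        · have hyl : (names.take y).length = y := by simp [List.length_take]; omega
          congr 1
          · rw [List.take_left' hyl]
          · rw [List.drop_left' hyl, hdropy, List.filter_cons]
            rw [if_neg (by simp [pvKeep, hcond])]
        · intro j hj
          have hjy : j < (names.take y).length := by simp [List.length_take]; omega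
          rw [List.getElem_append_left hjy, List.getElem_take]
          exact hpre j hj
      · rw [if_neg hcond]
        rw [ih names (y + 1) (by omega) (by omega) ?_]
        · have htt : names.take (y + 1) = names.take y ++ [names[y]] := by
            rw [List.take_add_one]
            simp [List.getElem?_eq_getElem h]
          rw [htt, hdropy, List.filter_cons, if_pos (by simp [pvKeep, hcond])]
          simp only [List.append_assoc, List.cons_append, List.nil_append]
        · intro j hj
          rcases Nat.lt_or_ge j y with hlt | hge
          · exact hpre j hlt
          · have : j = y := by omega
            subst this
            simp [pvKeep, hcond]
    · rw [dif_neg h]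
      have : y = names.length := by omega
      simp [this]

def pvPair (g : List Char → Int) (e : List Char) : List (List Char ⊕ Int) := [Sum.inl e, Sum.inr (g e)]

theorem pvMemFlat (g : List Char → Int) (S : List (List Char)) (e : List Char) :
    (S.flatMap (pvPair g)).any (fun x => decide (x = Sum.inl e)) = (decide (e ∈ S)) := by
  induction S with
  | nil => simp
  | cons a t ih =>
    simp only [List.flatMap_cons, pvPair, List.any_append, ih]
    by_cases he : e = a <;> simp [he, List.any_cons, eq_comm]

theorem pvEvolue_fold (g : List Char → Int) :
    ∀ (xs : List (List Char)) (S : List (List Char)),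
    xs.foldl (fun ev e => if ev.any (fun x => decide (x = Sum.inl e)) then ev
                          else ev ++ [Sum.inl e, Sum.inr (g e)]) (S.flatMap (pvPair g)) =
      (PySem.Set.update S xs).flatMap (pvPair g) := by
  intro xs
  induction xs with
  | nil => simp [PySem.Set.update]
  | cons e rest ih =>
    intro S
    rw [List.foldl_cons, PySem.Set.update_cons]
    by_cases he : e ∈ S
    · rw [if_pos (by rw [pvMemFlat]; simpa), PySem.Set.add_of_mem he]
      exact ih S
    · rw [if_neg (by rw [pvMemFlat]; simpa), PySem.Set.add_of_not_mem he]
      have : (S.flatMap (pvPair g)) ++ [Sum.inl e, Sum.inr (g e)] = (S ++ [e]).flatMap (pvPair g) := by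
        simp [pvPair]
      rw [this]
      exact ih (S ++ [e])

theorem pvCapLoop_shift : ∀ (k : Nat) (t : List (List Char ⊕ Int)) (a b : List Char ⊕ Int) (i : Nat),
    t.length - i ≤ k → pvCapLoop (a :: b :: t) (i + 2) = a :: b :: pvCapLoop t i := by
  intro k
  induction k with
  | zero =>
    intro t a b i hk
    have hni : ¬ i < t.length := by omega
    unfold pvCapLoop
    rw [dif_neg (by simp; omega), dif_neg hni]
  | succ k ih =>
    intro t a b i hk
    by_cases hi : i < t.length
    · conv_lhs => unfold pvCapLoop
      rw [dif_pos (by simp; omega)]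
      conv_rhs => unfold pvCapLoop
      rw [dif_pos hi]
      have hget : (a :: b :: t)[i + 2]'(by simp; omega) = t[i]'hi := by
        simp
      simp only [hget]
      have hset : ∀ x', (a :: b :: t).set (i + 2) x' = a :: b :: t.set i x' := by
        intro x'; rfl
      rw [hset]
      exact ih (t.set i _) a b (i + 2) (by simp; omega)
    · unfold pvCapLoop
      rw [dif_neg (by simp; omega), dif_neg hi]

theorem pvMajLoop_shift : ∀ (k : Nat) (t : List (List Char ⊕ Int)) (a b : List Char ⊕ Int) (i : Nat) (m : Int),
    t.length - i ≤ k → pvMajLoop (a :: b :: t) (i + 2) m = pvMajLoop t i m := by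
  intro k
  induction k with
  | zero =>
    intro t a b i m hk
    unfold pvMajLoop
    rw [dif_neg (by simp; omega), dif_neg (by omega)]
  | succ k ih =>
    intro t a b i m hk
    by_cases hi : i < t.length
    · conv_lhs => unfold pvMajLoop
      rw [dif_pos (by simp; omega)]
      conv_rhs => unfold pvMajLoop
      rw [dif_pos hi]
      have hget : (a :: b :: t)[i + 2]'(by simp; omega) = t[i]'hi := by simp
      simp only [hget]
      exact ih t a b (i + 2) _ (by omega)
    · unfold pvMajLoop
      rw [dif_neg (by simp; omega), dif_neg hi]

theorem pvCapLoop_pair (g : List Char → Int) :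
    ∀ (D : List (List Char)),
    pvCapLoop (D.flatMap (pvPair g)) 0 =
      D.flatMap (fun e => [Sum.inl (pvAltCap e), Sum.inr (g e)]) := by
  intro D
  induction D with
  | nil => simp [pvCapLoop]
  | cons e D' ih =>
    simp only [List.flatMap_cons, pvPair]
    have hcons : (([Sum.inl e, Sum.inr (g e)] : List (List Char ⊕ Int)) ++ D'.flatMap (pvPair g)) =
        Sum.inl e :: Sum.inr (g e) :: D'.flatMap (pvPair g) := rfl
    rw [hcons]
    conv_lhs => unfold pvCapLoop
    rw [dif_pos (by simp)]
    have hx : (Sum.inl e :: Sum.inr (g e) :: D'.flatMap (pvPair g))[0] = (Sum.inl e : List Char ⊕ Int) := rfl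
    simp only [hx]
    have hset : ∀ x', (Sum.inl e :: Sum.inr (g e) :: D'.flatMap (pvPair g)).set 0 x' =
        x' :: Sum.inr (g e) :: D'.flatMap (pvPair g) := by intro x'; rfl
    rw [hset]
    have hzero : (0 : Nat) + 2 = 0 + 2 := rfl
    rw [show (0 + 2 : Nat) = 0 + 2 from rfl]
    rw [pvCapLoop_shift (D'.flatMap (pvPair g)).length _ _ _ 0 (by omega)]
    rw [ih]
    congr 1
    unfold pvAltCap
    cases hh : e.head? with
    | none => simp [hh]
    | some c => by_cases hu : PySem.Chars.isupper c <;> simp [hh, hu]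

theorem pvMajLoop_pair (g : List Char → Int) :
    ∀ (D : List (List Char)) (m : Int),
    pvMajLoop (D.flatMap (fun e => [Sum.inl (pvAltCap e), Sum.inr (g e)])) 0 m =
      m + (D.countP (fun e => pvIsUpperStr (pvAltCap e)) : Int) := by
  intro D
  induction D with
  | nil => intro m; simp [pvMajLoop]
  | cons e D' ih =>
    intro m
    simp only [List.flatMap_cons]
    have hcons : (([Sum.inl (pvAltCap e), Sum.inr (g e)] : List (List Char ⊕ Int)) ++
        D'.flatMap (fun e => [Sum.inl (pvAltCap e), Sum.inr (g e)])) =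
        Sum.inl (pvAltCap e) :: Sum.inr (g e) ::
          D'.flatMap (fun e => [Sum.inl (pvAltCap e), Sum.inr (g e)]) := rfl
    rw [hcons]
    conv_lhs => unfold pvMajLoop
    rw [dif_pos (by simp)]
    have hx : (Sum.inl (pvAltCap e) :: Sum.inr (g e) ::
        D'.flatMap (fun e => [Sum.inl (pvAltCap e), Sum.inr (g e)]))[0] =
        (Sum.inl (pvAltCap e) : List Char ⊕ Int) := rfl
    simp only [hx]
    rw [pvMajLoop_shift (D'.flatMap (fun e => [Sum.inl (pvAltCap e), Sum.inr (g e)])).length _ _ _ 0 _ (by omega)]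
    rw [ih]
    rw [List.countP_cons]
    by_cases hp : pvIsUpperStr (pvAltCap e) <;> simp [hp] <;> push_cast <;> ring

def pvStep2 (st : PySem.Set (List Char) × Int) (n : List Char) : PySem.Set (List Char) × Int :=
  if PySem.Set.contains st.1 n then st
  else (PySem.Set.add st.1 n, if pvIsUpperStr (pvAltCap n) then st.2 + 1 else st.2)

theorem pvStep2_fold :
    ∀ (xs : List (List Char)) (S : PySem.Set (List Char)) (m : Int),
    xs.foldl pvStep2 (S, m) =
      (PySem.Set.update S xs,
        m + (((PySem.Set.update S xs).drop S.length).countP (fun e => pvIsUpperStr (pvAltCap e)) : Int)) := by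
  intro xs
  induction xs with
  | nil => intro S m; simp [PySem.Set.update]
  | cons e rest ih =>
    intro S m
    rw [List.foldl_cons, PySem.Set.update_cons]
    by_cases he : e ∈ S
    · have hc : pvStep2 (S, m) e = (S, m) := by
        unfold pvStep2
        rw [if_pos (by simpa [PySem.Set.contains_iff] using he)]
      rw [hc, PySem.Set.add_of_mem he]
      exact ih S m
    · have hc : pvStep2 (S, m) e =
          (S ++ [e], if pvIsUpperStr (pvAltCap e) then m + 1 else m) := by
        unfold pvStep2
        rw [if_neg (by simpa [PySem.Set.contains_iff] using he)]
        rw [PySem.Set.add_of_not_mem he]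
      rw [hc, PySem.Set.add_of_not_mem he, ih]
      obtain ⟨junk, hj⟩ : ∃ j, PySem.Set.update (S ++ [e]) rest = (S ++ [e]) ++ j :=
        ⟨_, PySem.Set.update_eq_append_filter _ _⟩
      rw [hj]
      have hd1 : ((S ++ [e]) ++ junk).drop S.length = e :: junk := by
        rw [List.append_assoc, List.drop_left' rfl]
        rfl
      have hd2 : ((S ++ [e]) ++ junk).drop (S ++ [e]).length = junk := List.drop_left' rfl
      rw [hd1, hd2, List.countP_cons]
      by_cases hp : pvIsUpperStr (pvAltCap e) <;> simp [hp] <;> push_cast <;> ring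

theorem pvLenFlat (g : List Char → Int) (D : List (List Char)) :
    (D.flatMap (fun e => [Sum.inl (pvAltCap e), Sum.inr (g e)])).length = 2 * D.length := by
  induction D with
  | nil => simp
  | cons e D' ih => simp [ih]; ring

theorem pvHeadBang (n : List Char) :
    (n.head? == some '!') = decide (PySem.List.pyGet? n 0 = some '!') := by
  rw [PySem.List.pyGet?_zero, List.head?_eq_getElem?]
  cases n[0]? with
  | none => simp
  | some c => by_cases hc : c = '!' <;> simp [hc]

theorem pvMain (nom : String) (hpre : Pre_Feature12 nom) : Feature12 nom = Feature12_alt nom := by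
  obtain ⟨h1, h2⟩ := hpre
  obtain ⟨heq, hnn⟩ := pvNames_eq_of_pre' nom.toList h1 h2
  -- shared name list
  set l := nom.toList with hl
  set fnsA := (pvPop (l.splitOn ',')).map pvStrip with hfnsA
  have hA : pvParse l = fnsA := pvParse_eq_spec l
  have hBnames :
      (if (l.foldl pvAltStep ([], [])).2 ≠ [] then
          (l.foldl pvAltStep ([], [])).1 ++ [(l.foldl pvAltStep ([], [])).2]
        else (l.foldl pvAltStep ([], [])).1) = fnsA := by
    have hb := pvAltNames_eq' l [] []
    simp only [List.nil_append] at hb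
    have hid : ((l.splitOn ',').map pvStrip).modifyHead (fun p : List Char => p) =
        (l.splitOn ',').map pvStrip := by
      cases ((l.splitOn ',').map pvStrip) <;> simp
    rw [hid] at hb
    rw [hb, heq]
  -- the ignore list
  have higlist : pvIgnores fnsA =
      (fnsA.filter (fun n => n.head? == some '!')).map (fun n => n.drop 1) := by
    unfold pvIgnores
    rw [PySem.List.foldl_append_ite (p := fun n => PySem.List.pyGet? n 0 = some '!')
      (f := fun n => PySem.List.slice n (some 1) none), List.nil_append]
    congr 1
    · funext n
      rw [PySem.List.slice_from_one, List.drop_one]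
    · congr 1
      funext n
      rw [pvHeadBang]
  set ig := pvIgnores fnsA with hig
  have hignmem : ∀ x : List Char,
      PySem.Set.contains (PySem.Set.ofList ((fnsA.filter (fun n => n.head? == some '!')).map (fun n => n.drop 1))) x
        = decide (x ∈ ig) := by
    intro x
    rw [higlist]
    by_cases hx : x ∈ (fnsA.filter (fun n => n.head? == some '!')).map (fun n => n.drop 1) <;>
      simp [PySem.Set.contains_iff, PySem.Set.mem_ofList, hx]
  -- remove loop = filter
  have hrem : pvRemoveLoop fnsA ig 0 = fnsA.filter (pvKeep ig) := by
    have := pvRemoveLoop_eq ig fnsA.length fnsA 0 (by omega) (by omega)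
      (fun j hj => absurd hj (Nat.not_lt_zero j))
    simpa using this
  set fns := fnsA.filter (pvKeep ig) with hfns
  set g : List Char → Int := fun e => (PySem.List.count fns e : Int) with hg
  set D := PySem.Set.ofList fns with hD
  set p : List Char → Bool := fun e => pvIsUpperStr (pvAltCap e) with hp
  -- A pipeline
  have hev : pvEvolue fns = D.flatMap (pvPair g) := by
    unfold pvEvolue
    have := pvEvolue_fold g fns []
    simpa [PySem.Set.update_nil_left] using this
  have hcap : pvCapLoop (D.flatMap (pvPair g)) 0 =
      D.flatMap (fun e => [Sum.inl (pvAltCap e), Sum.inr (g e)]) := pvCapLoop_pair g D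
  have hmaj : pvMajLoop (D.flatMap (fun e => [Sum.inl (pvAltCap e), Sum.inr (g e)])) 0 0 =
      0 + (D.countP p : Int) := pvMajLoop_pair g D 0
  have hlen : (D.flatMap (fun e => [Sum.inl (pvAltCap e), Sum.inr (g e)])).length = 2 * D.length :=
    pvLenFlat g D
  -- B fold
  have hbfold : fnsA.foldl
      (fun (st : PySem.Set (List Char) × Int) n =>
        if n.head? == some '!' ||
            PySem.Set.contains (PySem.Set.ofList ((fnsA.filter (fun n => n.head? == some '!')).map (fun n => n.drop 1))) n ||
            PySem.Set.contains st.1 n then st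
        else (PySem.Set.add st.1 n, if pvIsUpperStr (pvAltCap n) then st.2 + 1 else st.2))
      (PySem.Set.empty, 0) = (D, 0 + (D.countP p : Int)) := by
    rw [PySem.List.foldl_congr_mem fnsA _ (fun st n => if pvKeep ig n then pvStep2 st n else st) _ ?_]
    · rw [PySem.List.foldl_if_eq_foldl_filter (pvKeep ig) pvStep2]
      have := pvStep2_fold (fnsA.filter (pvKeep ig)) [] 0
      simpa [PySem.Set.update_nil_left, PySem.Set.empty] using this
    · intro acc n hn
      rw [hignmem n, pvHeadBang n]
      unfold pvKeep pvStep2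
      by_cases hx : n ∈ ig <;> by_cases hy : PySem.List.pyGet? n 0 = some '!' <;>
        by_cases hz : PySem.Set.contains acc.1 n <;> simp [hx, hy, hz]
  -- assemble
  show Feature12 nom = Feature12_alt nom
  unfold Feature12 Feature12_alt
  simp only [← hl, hA, hBnames, hrem, ← hig, hev, hcap, hmaj, hbfold]
  have hlen' : PySem.List.len (D.flatMap (fun e => [Sum.inl (pvAltCap e), Sum.inr (g e)])) =
      ((2 * D.length : Nat) : Int) := by rw [PySem.List.len_eq, hlen]
  rw [hlen']
  have hcond : (0 + (D.countP p : Int) > 5 ∧ ((2 * D.length : Nat) : Int) > 10) ↔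
      (0 + (D.countP p : Int) > 5 ∧ PySem.Set.len D > 5) := by
    unfold PySem.Set.len
    push_cast
    omega
  split_ifs with hA' hB' hB'
  · rfl
  · exact absurd (hcond.mp hA') hB'
  · exact absurd (hcond.mpr hB') hA'
  · rfl

-- ===== VERDICT (by name: the statement is the Claim_ definition above) =====
theorem Feature12_spec : Claim_equal_Feature12 := by
  intro nom _ hpre
  unfold Spec_Feature12
  exact pvMain nom hpre
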